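-- pv_equiv track=rewrite | github.com/CommonRoad/SanDRA | sandra/commonroad/describer_old.py | before_intersection
-- ===== SOURCE A (Python) =====
-- def before_intersection(lane_id: int, route: list[int]) -> bool:
--     # Check if id is in the store at all
--     if lane_id not in route:
--         raise ValueError(f"Unexpected lane_id {lane_id}")
--
--     # Find indices where range(12) numbers start and end
--     range12_start = None
--
--     for i in range(len(route)):
--         if range12_start is None and route[i] in range(12):
--             range12_start = i
--     id_position = route.index(lane_id)
--     return id_position < range12_start
-- ===== SOURCE B (Python) =====
-- def before_intersection(lane_id: int, route: list[int]) -> bool: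
--     # Check if id is in the store at all
--     if lane_id not in route:
--         raise ValueError(f"Unexpected lane_id {lane_id}")
--     # Single early-return scan: whichever comes first decides the answer.
--     for x in route:
--         if 0 <= x < 12:
--             return False
--         if x == lane_id:
--             return True
-- ===== Notes on version B (the rewrite author's own statement) =====
-- stated objective: simpler
-- what changed: A computes two indices via an index-tracking scan plus route.index and compares them; B makes one early-return pass over the values, returning False at the first range(12) element and True at the first lane_id occurrence, with no index arithmetic.
-- crash fix: When lane_id is in route but no element lies in range(12), A raises TypeError (id_position < None) while B returns True. — e.g. on before_intersection(15, [15]): A raises TypeError, B returns true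
import Mathlib
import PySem

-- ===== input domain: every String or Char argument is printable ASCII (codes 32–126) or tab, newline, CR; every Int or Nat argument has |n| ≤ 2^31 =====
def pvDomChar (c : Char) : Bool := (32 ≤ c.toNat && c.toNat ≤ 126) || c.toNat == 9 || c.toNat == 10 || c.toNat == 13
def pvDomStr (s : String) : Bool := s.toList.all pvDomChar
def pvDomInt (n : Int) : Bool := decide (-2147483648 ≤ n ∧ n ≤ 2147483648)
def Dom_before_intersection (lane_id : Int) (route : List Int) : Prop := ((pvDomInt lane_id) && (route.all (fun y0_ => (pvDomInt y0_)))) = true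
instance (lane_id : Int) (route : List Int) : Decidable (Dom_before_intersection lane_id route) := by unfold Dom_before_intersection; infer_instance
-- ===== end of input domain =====

-- B replaces A's two index computations (index-tracking scan + route.index) by one
-- early-return value scan; same O(n) cost, simpler decomposition (return value only).


-- ===== PORT A =====
-- 'route[i] in range(12)' for the loop body
def pvInR12 (x : Int) : Bool := decide (0 ≤ x) && decide (x < 12)

-- 'id_position < range12_start' (none = unreachable under Pre_: ValueError / TypeError)
def pvCmp : Option Nat → Option Int → Bool
  | some p, some s => decide ((p : Int) < s)
  | _, _ => false

def before_intersection (lane_id : Int) (route : List Int) : Bool :=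
  -- for i in range(len(route)): if range12_start is None and route[i] in range(12): range12_start = i
  let range12_start : Option Int :=
    (PySem.List.pyRange 0 (route.length : Int) 1).foldl
      (fun st i =>
        if st.isNone && ((PySem.List.pyGet? route i).any pvInR12) then some i else st)
      none
  -- id_position = route.index(lane_id); return id_position < range12_start
  pvCmp (PySem.List.index? route lane_id) range12_start

-- ===== PORT B =====
-- the early-return for-loop of B
def pvScanB (lane_id : Int) : List Int → Bool
  | [] => false                     -- loop falls through: unreachable under the guard
  | x :: xs =>
    if 0 ≤ x ∧ x < 12 then false
    else if x = lane_id then true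
    else pvScanB lane_id xs

def before_intersection_alt (lane_id : Int) (route : List Int) : Bool :=
  if lane_id ∈ route then pvScanB lane_id route
  else false                        -- ValueError in Python: outside Pre_

-- ===== PRECONDITION & SPEC =====
-- Pre_ excludes exactly the inputs where Python A raises: lane_id absent (ValueError)
-- or no element of route in range(12) (TypeError from 'id_position < None').
def Pre_before_intersection (lane_id : Int) (route : List Int) : Prop :=
  lane_id ∈ route ∧ ∃ x ∈ route, 0 ≤ x ∧ x < 12
instance (lane_id : Int) (route : List Int) : Decidable (Pre_before_intersection lane_id route) := by
  unfold Pre_before_intersection; infer_instance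

def pvWitness_before_intersection : Int × List Int := (20, [20, 3])

-- When lane_id is in route but no element lies in range(12), A raises TypeError
-- (id_position < None) while B returns True.
def Raises_before_intersection (lane_id : Int) (route : List Int) : Prop :=
  lane_id ∈ route ∧ ¬ ∃ x ∈ route, 0 ≤ x ∧ x < 12
instance (lane_id : Int) (route : List Int) : Decidable (Raises_before_intersection lane_id route) := by
  unfold Raises_before_intersection; infer_instance

def pvRaiseWitness_before_intersection : Int × List Int := (15, [15])
def pvRaiseWitnessOut_before_intersection : Bool := true

def Spec_before_intersection (lane_id : Int) (route : List Int) (out : Bool) : Prop := out = before_intersection_alt lane_id route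
instance (lane_id : Int) (route : List Int) (out : Bool) : Decidable (Spec_before_intersection lane_id route out) := by unfold Spec_before_intersection; infer_instance

-- ===== CLAIM (what is proved, stated in full; the proofs are below) =====
def Claim_equal_before_intersection : Prop := ∀ (lane_id : Int) (route : List Int), Dom_before_intersection lane_id route → Pre_before_intersection lane_id route → Spec_before_intersection lane_id route (before_intersection lane_id route)
def Claim_raises_before_intersection : Prop := (∀ (lane_id : Int) (route : List Int), Dom_before_intersection lane_id route → Raises_before_intersection lane_id route → ¬ Pre_before_intersection lane_id route) ∧ (Dom_before_intersection (pvRaiseWitness_before_intersection.1) (pvRaiseWitness_before_intersection.2) ∧ Raises_before_intersection (pvRaiseWitness_before_intersection.1) (pvRaiseWitness_before_intersection.2) ∧ before_intersection_alt (pvRaiseWitness_before_intersection.1) (pvRaiseWitness_before_intersection.2) = pvRaiseWitnessOut_before_intersection)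

-- ===== LEMMAS AND PROOFS =====

-- A's index loop computes the first index (as Int) whose element is in range(12).
theorem pvFoldA_aux (route : List Int) (n : Nat) (hn : n ≤ route.length) :
    (PySem.List.pyRange 0 (n : Int) 1).foldl
      (fun st i =>
        if st.isNone && ((PySem.List.pyGet? route i).any pvInR12) then some i else st)
      none
    = ((route.take n).findIdx? pvInR12).map (fun k => (k : Int)) := by
  induction n with
  | zero => simp [PySem.List.pyRange_one_eq_nil]
  | succ n ih =>
    have hn' : n ≤ route.length := Nat.le_of_succ_le hn
    have hlt : n < route.length := hn
    have hcast : ((n + 1 : Nat) : Int) = (n : Int) + 1 := by push_cast; ring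
    rw [hcast, PySem.List.pyRange_one_succ_right (by positivity), List.foldl_append, ih hn',
        List.take_add_one, List.findIdx?_append]
    have hget : route[n]? = some (route[n]'hlt) := List.getElem?_eq_getElem hlt
    rw [hget]
    cases hX : (route.take n).findIdx? pvInR12 with
    | some j => simp
    | none =>
      simp only [List.foldl_cons, List.foldl_nil,
        PySem.List.pyGet?_natCast, hget, Option.any_some, Option.none_or]
      by_cases hp : pvInR12 (route[n]'hlt) = true
      · simp [hp, List.length_take, Nat.min_eq_left hn']
      · simp [hp]

theorem pvFoldA_eq (route : List Int) :
    (PySem.List.pyRange 0 (route.length : Int) 1).foldl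
      (fun st i =>
        if st.isNone && ((PySem.List.pyGet? route i).any pvInR12) then some i else st)
      none
    = (route.findIdx? pvInR12).map (fun k => (k : Int)) := by
  simpa using pvFoldA_aux route route.length le_rfl

-- The final comparison of the two first-indices is B's early-return scan.
theorem pvCmp_eq_scan (lane_id : Int) (route : List Int)
    (hmem : lane_id ∈ route) (hr12 : ∃ x ∈ route, 0 ≤ x ∧ x < 12) :
    pvCmp (PySem.List.index? route lane_id) ((route.findIdx? pvInR12).map (fun k => (k : Int)))
      = pvScanB lane_id route := by
  induction route with
  | nil => cases hmem
  | cons x xs ih =>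
    by_cases h12 : 0 ≤ x ∧ x < 12
    · -- first range(12) element is at index 0: B returns false, A compares p < 0
      have hp : pvInR12 x = true := by simp [pvInR12, h12.1, h12.2]
      have hidx : ∃ p, PySem.List.index? (x :: xs) lane_id = some p := by
        rcases Option.isSome_iff_exists.mp
          ((PySem.List.index?_isSome_iff (x :: xs) lane_id).mpr hmem) with ⟨p, hpq⟩
        exact ⟨p, hpq⟩
      rcases hidx with ⟨p, hpq⟩
      rw [hpq, List.findIdx?_cons, if_pos hp]
      simp [pvCmp, pvScanB, h12]
    · have hp : pvInR12 x = false := by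
        simp only [pvInR12, Bool.and_eq_false_iff, decide_eq_false_iff_not]
        omega
      have hr12' : ∃ y ∈ xs, 0 ≤ y ∧ y < 12 := by
        rcases hr12 with ⟨y, hy, hyr⟩
        rcases List.mem_cons.mp hy with rfl | hy'
        · exact absurd hyr h12
        · exact ⟨y, hy', hyr⟩
      rcases hr12' with ⟨y, hy, hyr⟩
      have hfs : ∃ s, xs.findIdx? pvInR12 = some s := by
        have hsome : (xs.findIdx? pvInR12).isSome := by
          rw [List.findIdx?_isSome]
          exact List.any_eq_true.mpr ⟨y, hy, by simp [pvInR12, hyr.1, hyr.2]⟩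
        exact Option.isSome_iff_exists.mp hsome
      rcases hfs with ⟨s, hs⟩
      rw [List.findIdx?_cons, if_neg (by simp [hp]), hs]
      by_cases hx : x = lane_id
      · subst hx
        rw [PySem.List.index?_cons_self]
        simp [pvCmp, pvScanB, h12]
      · have hmem' : lane_id ∈ xs := by
          rcases List.mem_cons.mp hmem with rfl | h
          · exact absurd rfl hx
          · exact h
        rcases Option.isSome_iff_exists.mp
          ((PySem.List.index?_isSome_iff xs lane_id).mpr hmem') with ⟨p, hpq⟩
        rw [PySem.List.index?_cons_of_ne xs hx, hpq]
        have := ih hmem' ⟨y, hy, hyr⟩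
        rw [hpq, hs] at this
        simp only [pvCmp, pvScanB, if_neg h12, if_neg hx, Option.map_some]
        simp only [pvCmp] at this ⊢
        rw [← this]
        by_cases hps : (p : Int) < s
        · simp [hps, (show (p : Int) + 1 < (s : Int) + 1 by omega)]
        · simp [hps, (show ¬ ((p : Int) + 1 < (s : Int) + 1) by omega)]

-- Main scan equivalence under Pre_.
theorem pvMain (lane_id : Int) (route : List Int)
    (hmem : lane_id ∈ route) (hr12 : ∃ x ∈ route, 0 ≤ x ∧ x < 12) :
    before_intersection lane_id route = pvScanB lane_id route := by
  unfold before_intersection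
  rw [pvFoldA_eq]
  exact pvCmp_eq_scan lane_id route hmem hr12

-- ===== VERDICT (by name: the statement is the Claim_ definition above) =====
theorem before_intersection_spec : Claim_equal_before_intersection := by
  intro lane_id route _ hpre
  unfold Spec_before_intersection before_intersection_alt
  rw [if_pos hpre.1]
  exact pvMain lane_id route hpre.1 hpre.2

@[simp] theorem before_intersection_raises : Claim_raises_before_intersection := by
  unfold Claim_raises_before_intersection
  exact ⟨fun _ _ _ hr hp => hr.2 hp.2, by decide⟩
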